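-- pv_equiv track=rewrite | github.com/daniel-reich/ubiquitous-fiesta | HoFKikySJb4MebyYd_21.py | transform_matrix
-- ===== SOURCE A (Python) =====
-- def transform_matrix(lst):
--   new=[[0] * len(lst[0]) for r in range(len(lst))]
--   for rn in range(len(new)):
--     for cn in range (len(new[0])):
--       for c in range(len(lst[0])):
--         if c!=cn:
--           new[rn][cn]+= lst[rn][c]
--       for r in range(len(lst)):
--         if r!=rn:
--           new[rn][cn]+=lst[r][cn]
--   return(new)
-- ===== SOURCE B (Python) =====
-- def transform_matrix(lst):
--     # The result is R x C with C = len(lst[0]); only the first C entries of each row count.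
--     C = len(lst[0])
--     row_sums = [sum(row[:C]) for row in lst]
--     col_sums = [sum(row[c] for row in lst) for c in range(C)]
--     return [[rs + col_sums[c] - 2 * row[c] for c in range(C)]
--             for row, rs in zip(lst, row_sums)]
-- ===== Notes on version B (the rewrite author's own statement) =====
-- stated objective: faster
-- what changed: Precompute all row sums and column sums once, then fill each cell as row_sum + col_sum - 2*lst[r][c], replacing A's per-cell scan of its whole row and column.
-- outside the precondition, e.g. on transform_matrix([]): A returns [], B raises IndexError; on transform_matrix([[1, 2], [3]]): A raises IndexError, B raises IndexError
import Mathlib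
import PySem

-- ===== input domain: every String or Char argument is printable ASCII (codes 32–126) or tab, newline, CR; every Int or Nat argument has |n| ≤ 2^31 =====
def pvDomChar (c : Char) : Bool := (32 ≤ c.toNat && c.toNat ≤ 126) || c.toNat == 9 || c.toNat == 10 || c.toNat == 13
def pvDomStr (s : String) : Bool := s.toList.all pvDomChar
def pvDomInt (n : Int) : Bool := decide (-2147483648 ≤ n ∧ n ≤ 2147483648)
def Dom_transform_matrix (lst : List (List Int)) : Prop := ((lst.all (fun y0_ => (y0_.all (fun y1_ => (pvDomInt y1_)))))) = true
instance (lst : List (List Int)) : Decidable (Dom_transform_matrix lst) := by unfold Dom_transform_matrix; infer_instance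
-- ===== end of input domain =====

-- B replaces A's per-cell rescan of its whole row and column by row/column sums computed
-- once, each cell then being row_sum + col_sum - 2*lst[r][c].

-- ===== PORT A =====
-- All indices A uses come from range(...) and are in range under Pre_, so the Python
-- accesses lst[rn][c] are ported as getD with an unused default.
def transform_matrix (lst : List (List Int)) : List (List Int) :=
  let R := lst.length
  let C := (lst.getD 0 []).length
  (List.range R).map (fun rn =>
    (List.range C).map (fun cn =>
      let v := (List.range C).foldl
        (fun acc c => if c ≠ cn then acc + (lst.getD rn []).getD c 0 else acc) 0
      (List.range R).foldl
        (fun acc r => if r ≠ rn then acc + (lst.getD r []).getD cn 0 else acc) v))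

-- ===== PORT B =====
-- sum(xs) is ported as foldl (+) 0; the slice row[:C] (C ≥ 0) as List.take C.
def transform_matrix_alt (lst : List (List Int)) : List (List Int) :=
  let C := (lst.getD 0 []).length
  let rowSums := lst.map (fun row => (row.take C).foldl (· + ·) 0)
  let colSums := (List.range C).map (fun c => lst.foldl (fun acc row => acc + row.getD c 0) 0)
  (lst.zip rowSums).map (fun p =>
    (List.range C).map (fun c => p.2 + colSums.getD c 0 - 2 * p.1.getD c 0))

-- ===== PRECONDITION & SPEC =====
-- Pre_ excludes inputs where some row is shorter than row 0, on which A raises IndexError,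
-- and the empty list, where A happens to return [] (its comprehension never evaluates
-- lst[0]) while B's own evaluation of len(lst[0]) raises IndexError.
def Pre_transform_matrix (lst : List (List Int)) : Prop :=
  lst ≠ [] ∧ ∀ row ∈ lst, (lst.getD 0 []).length ≤ row.length
instance (lst : List (List Int)) : Decidable (Pre_transform_matrix lst) := by
  unfold Pre_transform_matrix; infer_instance
def pvWitness_transform_matrix : List (List Int) := [[1, 2], [3, 4]]

def Spec_transform_matrix (lst : List (List Int)) (out : List (List Int)) : Prop := out = transform_matrix_alt lst
instance (lst : List (List Int)) (out : List (List Int)) : Decidable (Spec_transform_matrix lst out) := by unfold Spec_transform_matrix; infer_instance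

-- ===== CLAIM (what is proved, stated in full; the proofs are below) =====
def Claim_equal_transform_matrix : Prop := ∀ (lst : List (List Int)), Dom_transform_matrix lst → Pre_transform_matrix lst → Spec_transform_matrix lst (transform_matrix lst)

-- ===== LEMMAS AND PROOFS =====

-- folding `acc + g x` over a list is the sum of the mapped list
theorem pv_foldl_add_map {α : Type} (g : α → Int) (l : List α) (init : Int) :
    l.foldl (fun acc x => acc + g x) init = init + (l.map g).sum := by
  induction l generalizing init with
  | nil => simp
  | cons a t ih => simp [List.foldl_cons, ih, add_assoc]

-- A's "skip index k" fold equals the full sum minus the skipped term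
theorem pv_foldl_skip (f : Nat → Int) (k n : Nat) (init : Int) :
    (List.range n).foldl (fun acc i => if i ≠ k then acc + f i else acc) init
      = init + ((List.range n).map f).sum - (if k < n then f k else 0) := by
  induction n generalizing init with
  | zero => simp
  | succ n ih =>
    rw [List.range_succ, List.foldl_append, List.map_append, List.sum_append, ih]
    by_cases h : n = k
    · subst h
      simp
      ring
    · have hk : (k < n + 1) ↔ (k < n) := by omega
      simp [h, hk]
      split <;> ring

theorem pv_range_map_getD {α : Type} (row : List α) (d : α) (C : Nat) (h : C ≤ row.length) :
    (List.range C).map (fun c => row.getD c d) = row.take C := by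
  apply List.ext_getElem
  · simp [h]
  · intro i h1 h2
    have hi : i < row.length := by simp at h1; omega
    simp [List.getElem?_eq_getElem hi]

theorem pv_range_map_getD_self {α : Type} (l : List α) (d : α) :
    (List.range l.length).map (fun i => l.getD i d) = l := by
  have := pv_range_map_getD l d l.length le_rfl
  simpa using this

-- ===== VERDICT (by name: the statement is the Claim_ definition above) =====
theorem transform_matrix_spec : Claim_equal_transform_matrix := by
  intro lst _ hpre
  obtain ⟨hne, hlen⟩ := hpre
  unfold Spec_transform_matrix transform_matrix transform_matrix_alt
  set C := (lst.getD 0 []).length with hC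
  apply List.ext_getElem
  · simp
  · intro r h1 h2
    simp only [List.getElem_map, List.getElem_range, List.getElem_zip]
    have hr : r < lst.length := by simpa using h1
    apply List.ext_getElem
    · simp
    · intro c hc1 hc2
      simp only [List.getElem_map, List.getElem_range]
      have hcC : c < C := by simpa using hc1
      -- row r of lst
      have hrowD : lst.getD r [] = lst[r] := List.getD_eq_getElem lst [] hr
      have hrowlen : C ≤ lst[r].length := hlen _ (List.getElem_mem hr)
      -- A side: two skip-folds
      rw [pv_foldl_skip, pv_foldl_skip]
      simp only [hcC, hr, if_pos]
      -- B side pieces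
      have hrowsum : (lst[r].take C).foldl (· + ·) 0
          = ((List.range C).map (fun c' => lst[r].getD c' 0)).sum := by
        rw [pv_range_map_getD lst[r] 0 C hrowlen]
        rw [← List.sum_eq_foldl]
      have hcol : ((List.range C).map
            (fun c' => lst.foldl (fun acc row => acc + row.getD c' 0) 0)).getD c 0
          = ((List.range lst.length).map (fun r' => (lst.getD r' []).getD c 0)).sum := by
        rw [List.getD_eq_getElem _ 0 (by simpa using hcC)]
        simp only [List.getElem_map, List.getElem_range]
        rw [pv_foldl_add_map]
        have : lst.map (fun row => row.getD c 0)
            = (List.range lst.length).map (fun r' => (lst.getD r' []).getD c 0) := by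
          conv_lhs => rw [← pv_range_map_getD_self lst []]
          simp [List.map_map, Function.comp]
        rw [this]; ring
      rw [hcol, hrowsum, hrowD]
      ring
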